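-- pv_equiv track=rewrite | github.com/ucscGenomeBrowser/kent | src/hg/makeDb/scripts/encode4regulation/generate_multiwig_ra.py | rename_subtrack
-- ===== SOURCE A (Python) =====
-- def rename_subtrack(hub_track_name, hub_container_name, native_container_name):
--     """Rename a hub subtrack to native convention.
--
--     Hub patterns:
--       RegMarkDNaseblood -> wgEncodeReg4DnaseBlood
--       AllRegMarkDNaseblood -> wgEncodeReg4DnaseAllBlood
--       AveRNAblood+ -> wgEncodeReg4TxnBloodPlus
--       AllAveRNAblood+ -> wgEncodeReg4TxnAllBloodPlus
--     """
--     name = hub_track_name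
--
--     # Handle "All" prefix
--     is_all = False
--     all_prefix = f"All{hub_container_name}"
--     if name.startswith(all_prefix):
--         is_all = True
--         organ_part = name[len(all_prefix):]
--     elif name.startswith(hub_container_name):
--         organ_part = name[len(hub_container_name):]
--     else:
--         # Shouldn't happen
--         return name
--
--     # Handle strand suffix for AveRNA
--     strand_suffix = ""
--     if organ_part.endswith('+'):
--         strand_suffix = "Plus"
--         organ_part = organ_part[:-1]
--     elif organ_part.endswith('-'):
--         strand_suffix = "Minus"
--         organ_part = organ_part[:-1]
--
--     # Capitalize organ name parts (blood_vessel -> BloodVessel)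
--     organ_capitalized = ''.join(word.capitalize() for word in organ_part.split('_'))
--
--     if is_all:
--         return f"{native_container_name}All{organ_capitalized}{strand_suffix}"
--     else:
--         return f"{native_container_name}{organ_capitalized}{strand_suffix}"
-- ===== SOURCE B (Python) =====
-- def rename_subtrack(hub_track_name, hub_container_name, native_container_name):
--     """Rename a hub subtrack to native convention (single-pass rewrite)."""
--     if hub_track_name.startswith("All" + hub_container_name):
--         is_all, rest = True, hub_track_name[len(hub_container_name) + 3:]
--     elif hub_track_name.startswith(hub_container_name):
--         is_all, rest = False, hub_track_name[len(hub_container_name):]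
--     else:
--         return hub_track_name
--
--     strand = {'+': 'Plus', '-': 'Minus'}.get(rest[-1:], '')
--     if strand:
--         rest = rest[:-1]
--
--     # one pass: drop underscores, uppercase the first letter of each word, lowercase the rest
--     out = []
--     start = True
--     for ch in rest:
--         if ch == '_':
--             start = True
--         else:
--             out.append(ch.upper() if start else ch.lower())
--             start = False
--
--     return native_container_name + ('All' if is_all else '') + ''.join(out) + strand
-- ===== Notes on version B (the rewrite author's own statement) =====
-- stated objective: alternative
-- what changed: B replaces A's split('_') / per-word capitalize / join pipeline by a single left-to-right pass over the organ characters (underscore restarts a word) and the two endswith strand branches by one dict lookup on the last-character slice.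
import Mathlib
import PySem

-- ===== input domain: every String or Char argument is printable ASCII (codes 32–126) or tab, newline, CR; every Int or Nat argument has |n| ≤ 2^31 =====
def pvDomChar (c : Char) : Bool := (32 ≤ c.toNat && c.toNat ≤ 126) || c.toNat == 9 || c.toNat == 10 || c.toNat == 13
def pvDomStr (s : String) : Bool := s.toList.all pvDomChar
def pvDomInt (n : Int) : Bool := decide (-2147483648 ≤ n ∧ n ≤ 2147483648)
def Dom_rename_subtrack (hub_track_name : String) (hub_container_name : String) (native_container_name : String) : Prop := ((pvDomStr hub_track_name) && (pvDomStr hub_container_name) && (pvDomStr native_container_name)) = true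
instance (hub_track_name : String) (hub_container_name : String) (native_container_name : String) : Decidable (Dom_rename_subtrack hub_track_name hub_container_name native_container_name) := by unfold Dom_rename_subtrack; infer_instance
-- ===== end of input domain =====

-- B replaces A's split('_')/capitalize/join pipeline by a single left-to-right pass over the
-- organ part and the two strand-suffix branches by one dict lookup on the last-character slice
-- (objective: alternative decomposition, same cost).

-- ===== PORT A =====
-- word.capitalize(): first char uppercased, rest lowercased (exact for the ASCII domain)
def pvCapWord (w : List Char) : List Char :=
  match w with
  | [] => []
  | ch :: cs => PySem.Chars.upperChar ch :: PySem.Chars.lower cs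

-- strand-suffix step of A: organ_part.endswith('+'/'-'), organ_part[:-1] (s[:-1] = dropLast, exact)
def pvStrandA (organ : List Char) : List Char × List Char :=
  if PySem.Chars.endswith organ ['+'] then ("Plus".toList, organ.dropLast)
  else if PySem.Chars.endswith organ ['-'] then ("Minus".toList, organ.dropLast)
  else ([], organ)

-- the part of A after the prefix branch: strand suffix, split('_')-capitalize-join, f-string assembly
def pvFinishA (native : List Char) (isAll : Bool) (organ : List Char) : String :=
  let sp := pvStrandA organ
  let organCap := PySem.Chars.join [] ((PySem.Chars.splitOn sp.2 ['_']).map pvCapWord)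
  String.ofList (native ++ (if isAll then ['A', 'l', 'l'] else []) ++ organCap ++ sp.1)

def rename_subtrack (hub_track_name : String) (hub_container_name : String) (native_container_name : String) : String :=
  let name := hub_track_name.toList
  let allPrefix := 'A' :: 'l' :: 'l' :: hub_container_name.toList   -- f"All{hub_container_name}"
  if PySem.Chars.startswith name allPrefix then
    -- name[len(all_prefix):] — nonnegative slice start = List.drop, exact
    pvFinishA native_container_name.toList true (name.drop allPrefix.length)
  else if PySem.Chars.startswith name hub_container_name.toList then
    pvFinishA native_container_name.toList false (name.drop hub_container_name.toList.length)
  else hub_track_name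

-- ===== PORT B =====
-- loop body of B's single pass: '_' restarts a word, otherwise emit upper/lower case
def pvStepB (st : List Char × Bool) (ch : Char) : List Char × Bool :=
  if ch = '_' then (st.1, true)
  else (st.1 ++ [if st.2 then PySem.Chars.upperChar ch else PySem.Chars.lowerChar ch], false)

def rename_subtrack_alt (hub_track_name : String) (hub_container_name : String) (native_container_name : String) : String :=
  let hl := hub_track_name.toList
  let cl := hub_container_name.toList
  let branch : Option (Bool × List Char) :=
    if PySem.Chars.startswith hl ('A' :: 'l' :: 'l' :: cl) then some (true, hl.drop (cl.length + 3))
    else if PySem.Chars.startswith hl cl then some (false, hl.drop cl.length)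
    else none
  match branch with
  | none => hub_track_name
  | some (isAll, rest0) =>
    -- {'+': 'Plus', '-': 'Minus'}.get(rest[-1:], '') — rest[-1:] via the slice primitive
    let strand := PySem.Dict.getD (PySem.Dict.ofList [((['+'] : List Char), ("Plus" : String)), (['-'], "Minus")])
                    (PySem.List.slice rest0 (some (-1)) none) ""
    let rest := if strand ≠ "" then rest0.dropLast else rest0
    let out := (rest.foldl pvStepB ([], true)).1
    String.ofList (native_container_name.toList ++ (if isAll then ['A', 'l', 'l'] else []) ++ out ++ strand.toList)

-- ===== PRECONDITION & SPEC =====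
def Spec_rename_subtrack (hub_track_name : String) (hub_container_name : String) (native_container_name : String) (out : String) : Prop := out = rename_subtrack_alt hub_track_name hub_container_name native_container_name
instance (hub_track_name : String) (hub_container_name : String) (native_container_name : String) (out : String) : Decidable (Spec_rename_subtrack hub_track_name hub_container_name native_container_name out) := by unfold Spec_rename_subtrack; infer_instance

-- ===== CLAIM (what is proved, stated in full; the proofs are below) =====
def Claim_equal_rename_subtrack : Prop := ∀ (hub_track_name : String) (hub_container_name : String) (native_container_name : String), Dom_rename_subtrack hub_track_name hub_container_name native_container_name → Spec_rename_subtrack hub_track_name hub_container_name native_container_name (rename_subtrack hub_track_name hub_container_name native_container_name)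

-- ===== LEMMAS AND PROOFS =====

-- pure (fuel-free) characterisation of splitOn on the single-char separator '_'
def pvSplit : List Char → List (List Char)
  | [] => [[]]
  | ch :: cs => if ch = '_' then [] :: pvSplit cs else (pvSplit cs).modifyHead (ch :: ·)

theorem pvSplit_ne_nil (cs : List Char) : pvSplit cs ≠ [] := by
  induction cs with
  | nil => simp [pvSplit]
  | cons ch cs ih =>
    simp only [pvSplit]
    split
    · simp
    · cases h : pvSplit cs with
      | nil => exact absurd h ih
      | cons w ws => simp

theorem splitOn_go_eq (l : List Char) : ∀ (fuel : Nat), l.length < fuel → ∀ (cur : List Char) (acc : List (List Char)),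
    PySem.Chars.splitOn.go ['_'] fuel l cur acc = acc.reverse ++ (pvSplit l).modifyHead (cur.reverse ++ ·) := by
  induction l with
  | nil =>
    intro fuel hf cur acc
    cases fuel with
    | zero => omega
    | succ f => simp [PySem.Chars.splitOn.go, pvSplit]
  | cons ch cs ih =>
    intro fuel hf cur acc
    cases fuel with
    | zero => omega
    | succ f =>
      by_cases hch : ch = '_'
      · subst hch
        have hpre : List.isPrefixOf ['_'] ('_' :: cs) = true := by simp [List.isPrefixOf]
        rw [PySem.Chars.splitOn.go]
        simp only [hpre, if_true, List.length_cons, List.length_nil, List.drop_succ_cons, List.drop_zero]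
        rw [ih f (by simpa using Nat.lt_of_succ_lt_succ hf) [] (cur.reverse :: acc)]
        simp only [pvSplit, if_true]
        cases pvSplit cs <;> simp [List.modifyHead]
      · have hpre : List.isPrefixOf ['_'] (ch :: cs) = false := by
          simp [List.isPrefixOf]; exact fun h => absurd h.symm hch
        rw [PySem.Chars.splitOn.go]
        simp only [hpre, Bool.false_eq_true, if_false]
        rw [ih f (by simpa using Nat.lt_of_succ_lt_succ hf) (ch :: cur) acc]
        have hne := pvSplit_ne_nil cs
        cases h : pvSplit cs with
        | nil => exact absurd h hne
        | cons w ws => simp [pvSplit, hch, h, List.modifyHead]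

theorem splitOn_eq_pvSplit (l : List Char) : PySem.Chars.splitOn l ['_'] = pvSplit l := by
  rw [PySem.Chars.splitOn, splitOn_go_eq l (l.length + 1) (by omega) [] []]
  have hne := pvSplit_ne_nil l
  cases h : pvSplit l with
  | nil => exact absurd h hne
  | cons w ws => simp [List.modifyHead]

theorem join_nil_cons (x : List Char) (xs : List (List Char)) :
    PySem.Chars.join [] (x :: xs) = x ++ PySem.Chars.join [] xs := by
  cases xs <;> simp [PySem.Chars.join, List.intercalate]

-- recursive specification of B's single pass
def pvRecB : List Char → Bool → List Char
  | [], _ => []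
  | ch :: cs, start =>
    if ch = '_' then pvRecB cs true
    else (if start then PySem.Chars.upperChar ch else PySem.Chars.lowerChar ch) :: pvRecB cs false

theorem foldl_pvStepB (cs : List Char) : ∀ (out : List Char) (start : Bool),
    (cs.foldl pvStepB (out, start)).1 = out ++ pvRecB cs start := by
  induction cs with
  | nil => intro out start; simp [pvRecB]
  | cons ch cs ih =>
    intro out start
    by_cases hch : ch = '_'
    · subst hch; simp [List.foldl_cons, pvStepB, pvRecB, ih]
    · simp [List.foldl_cons, pvStepB, hch, pvRecB, ih]

theorem capjoin_eq (cs : List Char) : ∀ (start : Bool),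
    (match pvSplit cs with
     | [] => []
     | w :: ws => (if start then pvCapWord w else PySem.Chars.lower w) ++ PySem.Chars.join [] (ws.map pvCapWord)) =
    pvRecB cs start := by
  induction cs with
  | nil => intro start; cases start <;> simp [pvSplit, pvRecB, pvCapWord, PySem.Chars.lower, PySem.Chars.join, List.intercalate]
  | cons ch cs ih =>
    intro start
    by_cases hch : ch = '_'
    · subst hch
      simp only [pvSplit, if_true, pvRecB]
      rw [← ih true]
      have hne := pvSplit_ne_nil cs
      cases h : pvSplit cs with
      | nil => exact absurd h hne
      | cons w ws =>
        simp [pvCapWord, PySem.Chars.lower, join_nil_cons]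
    · have hne := pvSplit_ne_nil cs
      cases h : pvSplit cs with
      | nil => exact absurd h hne
      | cons w ws =>
        simp only [pvSplit, hch, if_false, h, List.modifyHead, pvRecB]
        rw [← ih false, h]
        cases start <;> simp [pvCapWord, PySem.Chars.lower, List.map_cons]

theorem capA_eq_passB (cs : List Char) :
    PySem.Chars.join [] ((PySem.Chars.splitOn cs ['_']).map pvCapWord) = (cs.foldl pvStepB ([], true)).1 := by
  rw [foldl_pvStepB cs [] true, List.nil_append, splitOn_eq_pvSplit, ← capjoin_eq cs true]
  have hne := pvSplit_ne_nil cs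
  cases h : pvSplit cs with
  | nil => exact absurd h hne
  | cons w ws => simp [join_nil_cons]

-- A's two endswith branches and B's dict lookup of the last-character slice agree
theorem strand_eq (organ : List Char) :
    (pvStrandA organ).1 = (PySem.Dict.getD (PySem.Dict.ofList [((['+'] : List Char), ("Plus" : String)), (['-'], "Minus")])
        (PySem.List.slice organ (some (-1)) none) "").toList ∧
    (pvStrandA organ).2 = (if (PySem.Dict.getD (PySem.Dict.ofList [((['+'] : List Char), ("Plus" : String)), (['-'], "Minus")])
        (PySem.List.slice organ (some (-1)) none) "" : String) ≠ "" then organ.dropLast else organ) := by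
  have hdp : PySem.Dict.getD (PySem.Dict.ofList [((['+'] : List Char), ("Plus" : String)), (['-'], "Minus")]) ['+'] "" = "Plus" := by decide
  have hdm : PySem.Dict.getD (PySem.Dict.ofList [((['+'] : List Char), ("Plus" : String)), (['-'], "Minus")]) ['-'] "" = "Minus" := by decide
  have hd0 : ∀ y : Char, ¬ y = '+' → ¬ y = '-' →
      PySem.Dict.getD (PySem.Dict.ofList [((['+'] : List Char), ("Plus" : String)), (['-'], "Minus")]) [y] "" = "" := by
    intro y hp hm
    have h1 : ('+' == y) = false := beq_eq_false_iff_ne.mpr (Ne.symm hp)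
    have h2 : ('-' == y) = false := beq_eq_false_iff_ne.mpr (Ne.symm hm)
    have h : (PySem.Dict.ofList [((['+'] : List Char), ("Plus" : String)), (['-'], "Minus")]) = PySem.Dict.mk [(['+'], "Plus"), (['-'], "Minus")] := by rfl
    rw [h]
    simp [PySem.Dict.getD, PySem.Dict.get?, List.find?, h1, h2]
  induction organ using List.reverseRecOn with
  | nil =>
    have hs : PySem.List.slice ([] : List Char) (some (-1)) none = [] := by simp [PySem.List.slice]
    have hd : PySem.Dict.getD (PySem.Dict.ofList [((['+'] : List Char), ("Plus" : String)), (['-'], "Minus")]) ([] : List Char) "" = "" := by decide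
    rw [hs, hd]
    constructor <;> simp [pvStrandA, PySem.Chars.endswith, List.isSuffixOf]
  | append_singleton ys y _ =>
    have hslice : PySem.List.slice (ys ++ [y]) (some (-1)) none = [y] := by
      simp [PySem.List.slice]
    have hplus : PySem.Chars.endswith (ys ++ [y]) ['+'] = (y == '+') := by
      simp [PySem.Chars.endswith, List.isSuffixOf, List.isPrefixOf, eq_comm]
    have hminus : PySem.Chars.endswith (ys ++ [y]) ['-'] = (y == '-') := by
      simp [PySem.Chars.endswith, List.isSuffixOf, List.isPrefixOf, eq_comm]
    rw [hslice]
    by_cases hp : y = '+'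
    · subst hp
      rw [hdp]
      constructor <;> simp [pvStrandA, hplus]
    · by_cases hm : y = '-'
      · subst hm
        rw [hdm]
        constructor <;> simp [pvStrandA, hplus, hminus]
      · rw [hd0 y hp hm]
        constructor <;> simp [pvStrandA, hplus, hminus, hp, hm]

theorem finish_eq (native : String) (isAll : Bool) (organ : List Char) :
    pvFinishA native.toList isAll organ =
      (let strand := PySem.Dict.getD (PySem.Dict.ofList [((['+'] : List Char), ("Plus" : String)), (['-'], "Minus")])
          (PySem.List.slice organ (some (-1)) none) ""
       let rest := if strand ≠ "" then organ.dropLast else organ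
       let out := (rest.foldl pvStepB ([], true)).1
       String.ofList (native.toList ++ (if isAll then ['A', 'l', 'l'] else []) ++ out ++ strand.toList)) := by
  obtain ⟨h1, h2⟩ := strand_eq organ
  simp only [pvFinishA, capA_eq_passB]
  rw [← h2, ← h1]

-- ===== VERDICT (by name: the statement is the Claim_ definition above) =====
theorem rename_subtrack_spec : Claim_equal_rename_subtrack := by
  intro h c n _
  unfold Spec_rename_subtrack rename_subtrack rename_subtrack_alt
  have hlen : ('A' :: 'l' :: 'l' :: c.toList).length = c.toList.length + 3 := by
    simp
  by_cases h1 : PySem.Chars.startswith h.toList ('A' :: 'l' :: 'l' :: c.toList) = true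
  · simp only [h1, if_true, hlen]
    exact finish_eq n true (h.toList.drop (c.toList.length + 3))
  · simp only [Bool.not_eq_true] at h1
    by_cases h2 : PySem.Chars.startswith h.toList c.toList = true
    · simp only [h1, h2, Bool.false_eq_true, if_false, if_true]
      exact finish_eq n false (h.toList.drop c.toList.length)
    · simp only [Bool.not_eq_true] at h2
      simp [h1, h2]
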